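-- pv_equiv track=rewrite | github.com/IvanYachUkr/TerraPulse | scripts/consolidate_results.py | extract_feature_set_from_name
-- ===== SOURCE A (Python) =====
-- def extract_feature_set_from_name(name):
--     """Try to extract feature set from old-style config names."""
--     known_sets = [
--         "bands_indices_glcm_lbp", "bands_indices_texture",
--         "bands_indices_hog", "full_no_deltas", "bands_indices",
--         "all_full", "top500_full", "texture_all",
--     ]
--     for s in sorted(known_sets, key=len, reverse=True):
--         if name.startswith(s + "_"):
--             return s
--     return "unknown"
-- ===== SOURCE B (Python) =====
-- def extract_feature_set_from_name(name):
--     """Try to extract feature set from old-style config names."""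
--     known_sets = [
--         "bands_indices_glcm_lbp", "bands_indices_texture",
--         "bands_indices_hog", "full_no_deltas", "bands_indices",
--         "all_full", "top500_full", "texture_all",
--     ]
--     matches = [s for s in known_sets if name.startswith(s + "_")]
--     return max(matches, key=len) if matches else "unknown"
-- ===== Notes on version B (the rewrite author's own statement) =====
-- stated objective: simpler
-- what changed: A sorts the known sets by length descending and returns the first prefix match of a linear scan; B drops the sort, filters all matches in one comprehension over the unsorted list and reduces them with max(key=len).
import Mathlib
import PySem

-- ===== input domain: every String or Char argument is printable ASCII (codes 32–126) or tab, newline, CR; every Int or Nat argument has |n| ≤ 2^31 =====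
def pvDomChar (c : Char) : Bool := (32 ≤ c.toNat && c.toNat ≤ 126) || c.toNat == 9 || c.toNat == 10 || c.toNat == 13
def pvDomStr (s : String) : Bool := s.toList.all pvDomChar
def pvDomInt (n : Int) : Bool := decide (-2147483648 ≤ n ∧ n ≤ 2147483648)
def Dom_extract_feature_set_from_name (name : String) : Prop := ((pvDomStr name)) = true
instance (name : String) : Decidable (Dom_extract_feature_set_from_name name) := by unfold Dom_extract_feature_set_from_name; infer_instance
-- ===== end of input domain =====

-- B replaces A's sort-then-first-match scan by filtering all matching prefixes and taking max(key=len): simpler (no sort).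

-- ===== PORT A =====
-- the for-loop with early return: first s in the list with name.startswith(s + "_"), else "unknown"
def pvFirstMatchA (name : String) : List String → String
  | [] => "unknown"
  | s :: rest => if PySem.Str.startswith name (s ++ "_") then s else pvFirstMatchA name rest

def extract_feature_set_from_name (name : String) : String :=
  let known_sets : List String :=
    ["bands_indices_glcm_lbp", "bands_indices_texture",
     "bands_indices_hog", "full_no_deltas", "bands_indices",
     "all_full", "top500_full", "texture_all"]
  pvFirstMatchA name (PySem.List.sorted known_sets (fun s => PySem.Str.len s) true)

-- ===== PORT B =====
def extract_feature_set_from_name_alt (name : String) : String :=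
  let known_sets : List String :=
    ["bands_indices_glcm_lbp", "bands_indices_texture",
     "bands_indices_hog", "full_no_deltas", "bands_indices",
     "all_full", "top500_full", "texture_all"]
  let ms := known_sets.filter (fun s => PySem.Str.startswith name (s ++ "_"))
  match PySem.List.max? ms (fun s => PySem.Str.len s) with
  | some m => m
  | none => "unknown"

-- ===== PRECONDITION & SPEC =====
def Spec_extract_feature_set_from_name (name : String) (out : String) : Prop := out = extract_feature_set_from_name_alt name
instance (name : String) (out : String) : Decidable (Spec_extract_feature_set_from_name name out) := by unfold Spec_extract_feature_set_from_name; infer_instance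

-- ===== CLAIM (what is proved, stated in full; the proofs are below) =====
def Claim_equal_extract_feature_set_from_name : Prop := ∀ (name : String), Dom_extract_feature_set_from_name name → Spec_extract_feature_set_from_name name (extract_feature_set_from_name name)

-- ===== LEMMAS AND PROOFS =====

-- the concrete result of A's sort: lengths 22,20,17,14,13,11,11,8, stable on the tie
theorem pvSortedEq :
    PySem.List.sorted
      ["bands_indices_glcm_lbp", "bands_indices_texture",
       "bands_indices_hog", "full_no_deltas", "bands_indices",
       "all_full", "top500_full", "texture_all"] (fun s => PySem.Str.len s) true
    = ["bands_indices_glcm_lbp", "bands_indices_texture",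
       "bands_indices_hog", "full_no_deltas", "bands_indices",
       "top500_full", "texture_all", "all_full"] := by decide

-- ===== VERDICT (by name: the statement is the Claim_ definition above) =====
set_option maxHeartbeats 2000000 in
theorem extract_feature_set_from_name_spec : Claim_equal_extract_feature_set_from_name := by
  intro name _
  unfold Spec_extract_feature_set_from_name extract_feature_set_from_name extract_feature_set_from_name_alt
  simp only [pvSortedEq, pvFirstMatchA, List.filter_cons, List.filter_nil]
  cases h1 : PySem.Str.startswith name ("bands_indices_glcm_lbp" ++ "_") <;>
  cases h2 : PySem.Str.startswith name ("bands_indices_texture" ++ "_") <;>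
  cases h3 : PySem.Str.startswith name ("bands_indices_hog" ++ "_") <;>
  cases h4 : PySem.Str.startswith name ("full_no_deltas" ++ "_") <;>
  cases h5 : PySem.Str.startswith name ("bands_indices" ++ "_") <;>
  cases h6 : PySem.Str.startswith name ("all_full" ++ "_") <;>
  cases h7 : PySem.Str.startswith name ("top500_full" ++ "_") <;>
  cases h8 : PySem.Str.startswith name ("texture_all" ++ "_") <;>
  rfl
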